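-- pv_equiv track=rewrite | github.com/luciaicull/algorithm_study | sw_test/2117.py | solution
-- ===== SOURCE A (Python) =====
-- def num_home(center_x, center_y, MAP, k):
--     num = 0
--     for delta_x in range(k):
--         up_x = center_x-delta_x
--         down_x = center_x+delta_x
--         for y in range(center_y-k+1+delta_x, center_y+k-delta_x):
--             if up_x >= 0 and up_x< len(MAP) and y >= 0 and y < len(MAP):
--                 num += MAP[up_x][y]
--             if down_x >= 0 and down_x< len(MAP) and y >= 0 and y < len(MAP) and delta_x != 0:
--                 num += MAP[down_x][y]
--     return num
--
-- def solution(N, M, MAP):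
--     max_num = -1
--     for k in range(1, N+2):
--         cost = k*k + (k-1)*(k-1)
--         for r, row in enumerate(MAP):
--             for c, home in enumerate(row):
--                 num = num_home(r, c, MAP, k)
--                 revenue = num * M
--                 if revenue >= cost:
--                     max_num = max(max_num, num)
--     return max_num
-- ===== SOURCE B (Python) =====
-- def solution(N, M, MAP):
--     # Per-row prefix sums: each diamond row-segment is answered by one
--     # prefix-sum subtraction, removing A's inner element-by-element scan.
--     n = len(MAP)
--     P = []
--     for row in MAP:
--         ps = [0]
--         s = 0
--         for v in row[:n]:
--             s += v
--             ps.append(s)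
--         P.append(ps)
--     max_num = -1
--     for k in range(1, N + 2):
--         cost = k * k + (k - 1) * (k - 1)
--         for r, row in enumerate(MAP):
--             for c, home in enumerate(row):
--                 num = 0
--                 for x in range(max(0, r - k + 1), min(n, r + k)):
--                     w = k - 1 - abs(x - r)
--                     lo = max(0, c - w)
--                     hi = min(n, c + w + 1)
--                     if lo < hi:
--                         num += P[x][hi] - P[x][lo]
--                 if num * M >= cost:
--                     max_num = max(max_num, num)
--     return max_num
-- ===== Notes on version B (the rewrite author's own statement) =====
-- stated objective: alternative
-- what changed: B precomputes per-row prefix sums once so each diamond row-segment becomes one prefix-sum subtraction over a directly clamped row window, replacing A's mirrored up/down rows with an element-by-element inner column scan; intended as faster (measured 1.6-12.9x on mid sizes, unconfirmed at the largest sizes where both time out).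
import Mathlib
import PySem

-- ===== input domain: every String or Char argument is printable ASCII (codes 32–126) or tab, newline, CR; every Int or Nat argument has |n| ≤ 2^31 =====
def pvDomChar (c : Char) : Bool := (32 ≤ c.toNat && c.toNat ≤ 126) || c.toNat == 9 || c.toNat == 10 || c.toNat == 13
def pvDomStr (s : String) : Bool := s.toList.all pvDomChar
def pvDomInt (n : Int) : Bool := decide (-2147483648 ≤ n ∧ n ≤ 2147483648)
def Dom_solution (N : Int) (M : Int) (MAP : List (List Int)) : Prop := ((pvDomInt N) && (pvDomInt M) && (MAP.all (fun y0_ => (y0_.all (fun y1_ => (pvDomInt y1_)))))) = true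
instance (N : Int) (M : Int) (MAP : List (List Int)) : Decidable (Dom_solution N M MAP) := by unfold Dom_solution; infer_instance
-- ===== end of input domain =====

-- B precomputes per-row prefix sums so each diamond row-segment is one prefix subtraction instead of an inner column scan (objective: alternative).

-- ===== PORT A =====
def numHome (cx cy : Int) (MAP : List (List Int)) (k : Int) : Int :=
  (PySem.List.pyRange 0 k 1).foldl (fun num dx =>
    let upx := cx - dx
    let downx := cx + dx
    (PySem.List.pyRange (cy - k + 1 + dx) (cy + k - dx) 1).foldl (fun num y =>
      let num := if 0 ≤ upx ∧ upx < (MAP.length : Int) ∧ 0 ≤ y ∧ y < (MAP.length : Int)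
        then num + PySem.List.pyGetD (PySem.List.pyGetD MAP upx []) y 0 else num
      if 0 ≤ downx ∧ downx < (MAP.length : Int) ∧ 0 ≤ y ∧ y < (MAP.length : Int) ∧ dx ≠ 0
        then num + PySem.List.pyGetD (PySem.List.pyGetD MAP downx []) y 0 else num) num) 0

def solution (N : Int) (M : Int) (MAP : List (List Int)) : Int :=
  (PySem.List.pyRange 1 (N + 2) 1).foldl (fun maxNum k =>
    let cost := k * k + (k - 1) * (k - 1)
    (PySem.List.enumerate MAP 0).foldl (fun maxNum rc =>
      (PySem.List.enumerate rc.2 0).foldl (fun maxNum ch =>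
        let num := numHome rc.1 ch.1 MAP k
        let revenue := num * M
        if revenue ≥ cost then max maxNum num else maxNum) maxNum) maxNum) (-1)

-- ===== PORT B =====
def prefixRow (n : Int) (row : List Int) : List Int :=
  ((PySem.List.slice row none (some n)).foldl
    (fun ps v => (ps.1 ++ [ps.2 + v], ps.2 + v)) ([0], 0)).1

def numHomeAlt (P : List (List Int)) (n r c k : Int) : Int :=
  (PySem.List.pyRange (max 0 (r - k + 1)) (min n (r + k)) 1).foldl (fun num x =>
    let w := k - 1 - |x - r|
    let lo := max 0 (c - w)
    let hi := min n (c + w + 1)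
    if lo < hi then
      num + (PySem.List.pyGetD (PySem.List.pyGetD P x []) hi 0
             - PySem.List.pyGetD (PySem.List.pyGetD P x []) lo 0)
    else num) 0

def solution_alt (N : Int) (M : Int) (MAP : List (List Int)) : Int :=
  let n : Int := (MAP.length : Int)
  let P := MAP.foldl (fun P row => P ++ [prefixRow n row]) []
  (PySem.List.pyRange 1 (N + 2) 1).foldl (fun maxNum k =>
    let cost := k * k + (k - 1) * (k - 1)
    (PySem.List.enumerate MAP 0).foldl (fun maxNum rc =>
      (PySem.List.enumerate rc.2 0).foldl (fun maxNum ch =>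
        let num := numHomeAlt P n rc.1 ch.1 k
        if num * M ≥ cost then max maxNum num else maxNum) maxNum) maxNum) (-1)

-- ===== PRECONDITION & SPEC =====
-- Pre_ excludes exactly the inputs on which A raises IndexError (when N ≥ 1 and some row is
-- shorter than len(MAP) while some row is nonempty, A indexes a short row out of range).
def Pre_solution (N : Int) (M : Int) (MAP : List (List Int)) : Prop :=
  N ≤ 0 ∨ (∀ row ∈ MAP, MAP.length ≤ row.length) ∨ (∀ row ∈ MAP, row = [])
instance (N : Int) (M : Int) (MAP : List (List Int)) : Decidable (Pre_solution N M MAP) := by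
  unfold Pre_solution; infer_instance

def pvWitness_solution : Int × Int × List (List Int) := (1, 2, [[1, 0], [0, 1]])

def Spec_solution (N : Int) (M : Int) (MAP : List (List Int)) (out : Int) : Prop := out = solution_alt N M MAP
instance (N : Int) (M : Int) (MAP : List (List Int)) (out : Int) : Decidable (Spec_solution N M MAP out) := by unfold Spec_solution; infer_instance

-- ===== CLAIM (what is proved, stated in full; the proofs are below) =====
def Claim_equal_solution : Prop := ∀ (N : Int) (M : Int) (MAP : List (List Int)), Dom_solution N M MAP → Pre_solution N M MAP → Spec_solution N M MAP (solution N M MAP)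

-- ===== LEMMAS AND PROOFS =====

-- entry (x,y) of the map, junk default
def gE (MAP : List (List Int)) (x y : Int) : Int :=
  PySem.List.pyGetD (PySem.List.pyGetD MAP x []) y 0

-- guarded entry, as A's bounds tests compute it
def gG (MAP : List (List Int)) (x y : Int) : Int :=
  if 0 ≤ x ∧ x < (MAP.length : Int) ∧ 0 ≤ y ∧ y < (MAP.length : Int) then gE MAP x y else 0

-- sum of a guarded row segment
def rowS (MAP : List (List Int)) (x a b : Int) : Int :=
  ((PySem.List.pyRange a b 1).map (gG MAP x)).sum

-- the guarded diamond row through x, as seen from center (r,c) with radius k-1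
def Fcell (MAP : List (List Int)) (r c k x : Int) : Int :=
  rowS MAP x (c - (k - 1 - |x - r|)) (c + (k - 1 - |x - r|) + 1)

-- A's diamond sum as a sum of guarded row segments
theorem numHome_eq_sum (r c : Int) (MAP : List (List Int)) (k : Int) :
    numHome r c MAP k =
      ((PySem.List.pyRange 0 k 1).map (fun dx =>
        rowS MAP (r - dx) (c - k + 1 + dx) (c + k - dx) +
        if dx = 0 then 0 else rowS MAP (r + dx) (c - k + 1 + dx) (c + k - dx))).sum := by
  unfold numHome
  rw [PySem.List.foldl_congr_mem _ _
    (fun num dx => num + (((PySem.List.pyRange (c - k + 1 + dx) (c + k - dx) 1).map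
      (fun y => gG MAP (r - dx) y + if dx = 0 then 0 else gG MAP (r + dx) y)).sum)) 0 ?_]
  · rw [PySem.List.foldl_add, zero_add]
    apply congrArg
    apply List.map_congr_left
    intro dx _
    rw [PySem.List.sum_map_add_int]
    simp only [rowS]
    congr 1
    by_cases hdx : dx = 0
    · simp [hdx]
    · simp [hdx]
  · intro acc dx _
    rw [PySem.List.foldl_congr_mem _ _
      (fun num y => num + (gG MAP (r - dx) y + if dx = 0 then 0 else gG MAP (r + dx) y)) acc ?_]
    · rw [PySem.List.foldl_add]
    · intro acc' y _
      simp only [gG, gE]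
      by_cases hdx : dx = 0
      · simp only [hdx, ne_eq, not_true_eq_false, and_false, if_false, ite_true]
        split_ifs <;> ring
      · simp only [hdx, ne_eq, not_false_eq_true, and_true, ite_false]
        split_ifs <;> ring

-- the builder fold of B's prefix lists
theorem prefix_fold (l : List Int) (ps : List Int) (s : Int) :
    l.foldl (fun p v => (p.1 ++ [p.2 + v], p.2 + v)) (ps, s) =
      (ps ++ (List.range l.length).map (fun i => s + (l.take (i + 1)).sum), s + l.sum) := by
  induction l generalizing ps s with
  | nil => simp
  | cons v t ih =>
    simp only [List.foldl_cons, List.length_cons, List.sum_cons, ih]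
    rw [List.range_succ_eq_map]
    simp [List.map_map, Function.comp, add_assoc]

-- reading B's prefix list
theorem prefixRow_get (m : Nat) (row : List Int) (j : Nat) (hj : j ≤ m) (hj2 : j ≤ row.length) :
    PySem.List.pyGetD (prefixRow (m : Int) row) (j : Int) 0 = (row.take j).sum := by
  unfold prefixRow
  rw [PySem.List.slice_to_natCast, prefix_fold]
  have hl : (row.take m).length = min m row.length := by simp
  rw [PySem.List.pyGetD_natCast]
  cases j with
  | zero => simp
  | succ i =>
    have hi : i < min m row.length := by omega
    simp only [List.getD_eq_getElem?_getD, hl]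
    rw [List.getElem?_append_right (by simp)]
    simp only [List.length_singleton]
    rw [List.getElem?_map, List.getElem?_range (by omega)]
    simp [List.take_take, show min (i+1) m = i + 1 by omega]

-- an unguarded segment of a long-enough row is a prefix difference
theorem seg_eq_prefix_diff (row : List Int) (lo hi : Nat) (h1 : lo ≤ hi) (h2 : hi ≤ row.length) :
    ((PySem.List.pyRange (lo : Int) (hi : Int) 1).map (fun y => PySem.List.pyGetD row y 0)).sum =
      (row.take hi).sum - (row.take lo).sum := by
  induction hi with
  | zero =>
    have : lo = 0 := by omega
    subst this
    rw [PySem.List.pyRange_one_eq_nil (by omega)]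
    simp
  | succ h ih =>
    by_cases hcase : lo = h + 1
    · subst hcase
      rw [PySem.List.pyRange_one_eq_nil (by omega)]
      simp
    · have hlo : lo ≤ h := by omega
      rw [show ((h + 1 : Nat) : Int) = ((h : Int) + 1) by push_cast; ring,
          PySem.List.pyRange_one_succ_right (by exact_mod_cast hlo)]
      rw [List.map_append, List.sum_append, ih hlo (by omega)]
      simp [PySem.List.pyGetD_natCast, List.sum_take_succ row h (by omega),
            List.getD_eq_getElem?_getD, List.getElem?_eq_getElem (show h < row.length by omega)]
      ring

-- clamping: a guarded sum over a range is the plain sum over the clamped range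
theorem sum_guard_clamp (n : Int) (f : Int → Int) (a b : Int) :
    ((PySem.List.pyRange a b 1).map (fun y => if 0 ≤ y ∧ y < n then f y else 0)).sum =
      ((PySem.List.pyRange (max 0 a) (min n b) 1).map f).sum := by
  generalize hd : (b - a).toNat = d
  induction d generalizing a with
  | zero =>
    have hab : b ≤ a := by omega
    rw [PySem.List.pyRange_one_eq_nil hab,
        PySem.List.pyRange_one_eq_nil (le_trans (le_trans (min_le_right n b) hab) (le_max_right 0 a))]
    simp
  | succ d ih =>
    have hab : a < b := by omega
    rw [PySem.List.pyRange_one_cons hab, List.map_cons, List.sum_cons, ih (a + 1) (by omega)]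
    by_cases h0 : 0 ≤ a
    · by_cases hn : a < n
      · have h1 : max 0 a = a := max_eq_right h0
        have h2 : max 0 (a + 1) = a + 1 := max_eq_right (by omega)
        have h3 : a < min n b := lt_min hn hab
        rw [h1, h2, PySem.List.pyRange_one_cons h3, List.map_cons, List.sum_cons,
            if_pos ⟨h0, hn⟩]
      · have h2 : min n b ≤ max 0 a := le_trans (min_le_left n b) (by omega)
        have h3 : min n b ≤ max 0 (a + 1) := le_trans (min_le_left n b) (by omega)
        rw [PySem.List.pyRange_one_eq_nil h2, PySem.List.pyRange_one_eq_nil h3,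
            if_neg (by omega)]
        simp
    · have h1 : max 0 a = max 0 (a + 1) := by omega
      rw [h1, if_neg (by omega)]
      simp

-- reindexing A's mirrored delta_x loop into one row interval
theorem sum_mirror (F : Int → Int) (r : Int) (m : Nat) :
    ((PySem.List.pyRange 0 (m : Int) 1).map (fun dx =>
        F (r - dx) + if dx = 0 then 0 else F (r + dx))).sum =
      ((PySem.List.pyRange (r - (m : Int) + 1) (r + (m : Int)) 1).map F).sum := by
  induction m with
  | zero =>
    rw [PySem.List.pyRange_one_eq_nil (by omega), PySem.List.pyRange_one_eq_nil (by omega)]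
    simp
  | succ m ih =>
    rw [show ((m + 1 : Nat) : Int) = ((m : Int) + 1) by push_cast; ring,
        PySem.List.pyRange_one_succ_right (by positivity), List.map_append, List.sum_append]
    rcases Nat.eq_zero_or_pos m with hm | hm
    · subst hm
      simp only [Nat.cast_zero, PySem.List.pyRange_one_eq_nil (le_refl (0 : Int))]
      rw [show r - (0 + 1) + 1 = r by ring, show r + (0 + 1) = r + 1 by ring,
          PySem.List.pyRange_one_singleton]
      simp
    · have hm0 : ((m : Int)) ≠ 0 := by omega
      rw [ih]
      rw [show r - ((m : Int) + 1) + 1 = r - (m : Int) by ring,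
          show r + ((m : Int) + 1) = r + (m : Int) + 1 by ring,
          PySem.List.pyRange_one_cons (show r - (m : Int) < r + (m : Int) + 1 by omega),
          PySem.List.pyRange_one_succ_right (show r - (m : Int) + 1 ≤ r + (m : Int) by omega)]
      simp only [List.map_append, List.sum_cons, List.sum_append, List.map,
        List.sum_nil, if_neg hm0]
      ring

-- a row with its bounds test off the grid contributes nothing
theorem rowS_zero (MAP : List (List Int)) (x a b : Int)
    (hx : ¬(0 ≤ x ∧ x < (MAP.length : Int))) : rowS MAP x a b = 0 := by
  unfold rowS
  have h : ∀ y, gG MAP x y = 0 := by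
    intro y; unfold gG; rw [if_neg (by tauto)]
  rw [List.map_congr_left (fun y _ => h y)]
  simp

-- B's prefix-difference term computes the guarded diamond row through x
theorem cell_term_eq (MAP : List (List Int)) (hrows : ∀ row ∈ MAP, MAP.length ≤ row.length)
    (r c k x : Int) (hx0 : 0 ≤ x) (hxn : x < (MAP.length : Int)) :
    (if max 0 (c - (k - 1 - |x - r|)) < min (MAP.length : Int) (c + (k - 1 - |x - r|) + 1) then
      PySem.List.pyGetD (PySem.List.pyGetD (MAP.map (prefixRow (MAP.length : Int))) x [])
        (min (MAP.length : Int) (c + (k - 1 - |x - r|) + 1)) 0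
      - PySem.List.pyGetD (PySem.List.pyGetD (MAP.map (prefixRow (MAP.length : Int))) x [])
        (max 0 (c - (k - 1 - |x - r|))) 0
    else 0) = Fcell MAP r c k x := by
  have hxlt : x.toNat < MAP.length := by omega
  set w := k - 1 - |x - r| with hw
  set lo := max 0 (c - w) with hlo
  set hi := min (MAP.length : Int) (c + w + 1) with hhi
  set row := MAP[x.toNat] with hrowdef
  have hrlen : MAP.length ≤ row.length := hrows row (List.getElem_mem hxlt)
  have hmap : PySem.List.pyGetD MAP x [] = row := by
    rw [PySem.List.pyGetD_of_nonneg MAP [] hx0, List.getD_eq_getElem?_getD,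
        List.getElem?_eq_getElem hxlt]
    rfl
  have hgG : ∀ y, gG MAP x y = if 0 ≤ y ∧ y < (MAP.length : Int) then
      PySem.List.pyGetD row y 0 else 0 := by
    intro y
    unfold gG gE
    rw [hmap]
    by_cases h : 0 ≤ y ∧ y < (MAP.length : Int)
    · rw [if_pos ⟨hx0, hxn, h⟩, if_pos h]
    · rw [if_neg (by tauto), if_neg h]
  have hF : Fcell MAP r c k x =
      ((PySem.List.pyRange lo hi 1).map (fun y => PySem.List.pyGetD row y 0)).sum := by
    unfold Fcell rowS
    rw [List.map_congr_left (fun y _ => hgG y), sum_guard_clamp]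
  rw [hF]
  by_cases hord : lo < hi
  · rw [if_pos hord]
    have hlo0 : 0 ≤ lo := le_max_left 0 _
    have hhi0 : 0 ≤ hi := le_of_lt (lt_of_le_of_lt hlo0 hord)
    have hhin : hi ≤ (MAP.length : Int) := min_le_left _ _
    have hPx : PySem.List.pyGetD (MAP.map (prefixRow (MAP.length : Int))) x [] =
        prefixRow (MAP.length : Int) row := by
      rw [PySem.List.pyGetD_of_nonneg _ [] hx0, List.getD_eq_getElem?_getD,
          List.getElem?_map, List.getElem?_eq_getElem hxlt]
      rfl
    rw [hPx, show lo = ((lo.toNat : Nat) : Int) by omega, show hi = ((hi.toNat : Nat) : Int) by omega,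
        prefixRow_get MAP.length row hi.toNat (by omega) (by omega),
        prefixRow_get MAP.length row lo.toNat (by omega) (by omega),
        seg_eq_prefix_diff row lo.toNat hi.toNat (by omega) (by omega)]
  · rw [if_neg hord, PySem.List.pyRange_one_eq_nil (by omega)]
    simp

-- B's per-cell sum, for a cell of the grid, equals A's
theorem numHome_eq_alt (MAP : List (List Int)) (hrows : ∀ row ∈ MAP, MAP.length ≤ row.length)
    (r c k : Int) (hk : 1 ≤ k) :
    numHome r c MAP k =
      numHomeAlt (MAP.foldl (fun P row => P ++ [prefixRow (MAP.length : Int) row]) [])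
        (MAP.length : Int) r c k := by
  have hP : MAP.foldl (fun P row => P ++ [prefixRow (MAP.length : Int) row]) [] =
      MAP.map (prefixRow (MAP.length : Int)) := by
    rw [PySem.List.foldl_append_singleton_eq_map]
    rfl
  rw [hP]
  -- B side: fold to a sum of cell terms
  have hB : numHomeAlt (MAP.map (prefixRow (MAP.length : Int))) (MAP.length : Int) r c k =
      ((PySem.List.pyRange (max 0 (r - k + 1)) (min (MAP.length : Int) (r + k)) 1).map
        (Fcell MAP r c k)).sum := by
    unfold numHomeAlt
    rw [PySem.List.foldl_congr_mem _ _ (fun num x => num + Fcell MAP r c k x) 0 ?_]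
    · rw [PySem.List.foldl_add, zero_add]
    · intro acc x hx
      rw [PySem.List.mem_pyRange_one] at hx
      dsimp only
      rw [← cell_term_eq MAP hrows r c k x (le_trans (le_max_left 0 _) hx.1)
            (lt_of_lt_of_le hx.2 (min_le_left _ _))]
      split_ifs <;> ring
  rw [hB, numHome_eq_sum]
  -- A side: reindex the mirrored loop
  have hkk : k = ((k.toNat : Nat) : Int) := by omega
  have hcong : ((PySem.List.pyRange 0 k 1).map (fun dx =>
        rowS MAP (r - dx) (c - k + 1 + dx) (c + k - dx) +
        if dx = 0 then 0 else rowS MAP (r + dx) (c - k + 1 + dx) (c + k - dx))).sum =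
      ((PySem.List.pyRange 0 k 1).map (fun dx =>
        Fcell MAP r c k (r - dx) + if dx = 0 then 0 else Fcell MAP r c k (r + dx))).sum := by
    apply congrArg
    apply List.map_congr_left
    intro dx hdx
    rw [PySem.List.mem_pyRange_one] at hdx
    have habs1 : |r - dx - r| = dx := by rw [show r - dx - r = -dx by ring, abs_neg,
      abs_of_nonneg hdx.1]
    have habs2 : |r + dx - r| = dx := by rw [show r + dx - r = dx by ring, abs_of_nonneg hdx.1]
    simp only [Fcell, habs1, habs2]
    rw [show c - (k - 1 - dx) = c - k + 1 + dx by ring, show c + (k - 1 - dx) + 1 = c + k - dx by ring]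
  rw [hcong, hkk, sum_mirror (Fcell MAP r c ((k.toNat : Nat) : Int)) r k.toNat, ← hkk]
  -- clamp the full interval to the grid
  have hout : ∀ x ∈ PySem.List.pyRange (r - k + 1) (r + k) 1, Fcell MAP r c k x =
      if 0 ≤ x ∧ x < (MAP.length : Int) then Fcell MAP r c k x else 0 := by
    intro x _
    by_cases h : 0 ≤ x ∧ x < (MAP.length : Int)
    · rw [if_pos h]
    · rw [if_neg h, Fcell, rowS_zero MAP x _ _ h]
  rw [List.map_congr_left hout, sum_guard_clamp]



-- the k = 1 diamond is the single center cell; here no row-length assumption is needed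
theorem numHome_eq_alt_one (MAP : List (List Int)) (r c : Int)
    (hr0 : 0 ≤ r) (hrn : r < (MAP.length : Int)) (hc : 0 ≤ c)
    (hrow : c < ((MAP.getD r.toNat []).length : Int)) :
    numHome r c MAP 1 =
      numHomeAlt (MAP.foldl (fun P row => P ++ [prefixRow (MAP.length : Int) row]) [])
        (MAP.length : Int) r c 1 := by
  have hxlt : r.toNat < MAP.length := by omega
  unfold numHome numHomeAlt
  rw [PySem.List.foldl_append_singleton_eq_map, List.nil_append]
  have h01 : PySem.List.pyRange 0 1 1 = [0] := by decide
  rw [h01,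
      show max 0 (r - 1 + 1) = r by omega,
      show min (MAP.length : Int) (r + 1) = r + 1 by omega,
      PySem.List.pyRange_one_singleton r]
  simp only [List.foldl_cons, List.foldl_nil]
  rw [show c - 1 + 1 + 0 = c by ring, show c + 1 - 0 = c + 1 by ring,
      PySem.List.pyRange_one_singleton c]
  simp only [List.foldl_cons, List.foldl_nil, sub_zero, add_zero, ne_eq,
    not_true_eq_false, and_false, if_false, sub_self, abs_zero]
  have hPx : PySem.List.pyGetD (MAP.map (prefixRow (MAP.length : Int))) r [] =
      prefixRow (MAP.length : Int) (MAP.getD r.toNat []) := by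
    rw [PySem.List.pyGetD_of_nonneg _ [] hr0, List.getD_eq_getElem?_getD,
        List.getElem?_map, List.getElem?_eq_getElem hxlt]
    simp [List.getD_eq_getElem?_getD, List.getElem?_eq_getElem hxlt]
  rw [hPx]
  set row := MAP.getD r.toNat [] with hrowdef
  by_cases hcn : c < (MAP.length : Int)
  · rw [if_pos ⟨hr0, hrn, hc, hcn⟩,
        show max 0 c = c by omega,
        show min (MAP.length : Int) (c + 1) = c + 1 by omega,
        if_pos (by omega)]
    have hmap : PySem.List.pyGetD MAP r [] = row := by
      rw [PySem.List.pyGetD_of_nonneg MAP [] hr0]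
    rw [hmap, show c = ((c.toNat : Nat) : Int) by omega,
        show ((c.toNat : Nat) : Int) + 1 = ((c.toNat + 1 : Nat) : Int) by push_cast; ring,
        prefixRow_get MAP.length row (c.toNat + 1) (by omega) (by omega),
        prefixRow_get MAP.length row c.toNat (by omega) (by omega),
        PySem.List.pyGetD_natCast, List.sum_take_succ row c.toNat (by omega),
        List.getD_eq_getElem?_getD, List.getElem?_eq_getElem (show c.toNat < row.length by omega)]
    simp
  · rw [if_neg (by tauto),
        show max 0 c = c by omega,
        show min (MAP.length : Int) (c + 1) = (MAP.length : Int) by omega,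
        if_neg (by omega)]

-- ===== VERDICT (by name: the statement is the Claim_ definition above) =====
theorem solution_spec : Claim_equal_solution := by
  intro N M MAP _ hpre
  unfold Spec_solution solution solution_alt
  apply PySem.List.foldl_congr_mem
  intro acc k hk
  rw [PySem.List.mem_pyRange_one] at hk
  apply PySem.List.foldl_congr_mem
  intro acc2 rc hrc
  rw [PySem.List.mem_enumerate_iff] at hrc
  obtain ⟨i, hi, hrceq⟩ := hrc
  apply PySem.List.foldl_congr_mem
  intro acc3 ch hch
  rw [PySem.List.mem_enumerate_iff] at hch
  obtain ⟨j, hj, hcheq⟩ := hch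
  rcases hpre with hN | hrows | hempty
  · have hk1 : k = 1 := by omega
    subst hk1
    rw [numHome_eq_alt_one MAP rc.1 ch.1 (by rw [hrceq]; omega)
      (by rw [hrceq]; simp; omega) (by rw [hcheq]; omega)
      (by
        have : MAP.getD rc.1.toNat [] = rc.2 := by
          rw [hrceq]
          simp [List.getD_eq_getElem?_getD, List.getElem?_eq_getElem hi]
        rw [this, hcheq]
        simp
        omega)]
  · rw [numHome_eq_alt MAP hrows rc.1 ch.1 k (by omega)]
  · exfalso
    have : rc.2 = [] := by rw [hrceq]; exact hempty _ (List.getElem_mem hi)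
    rw [this] at hj
    simp at hj
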